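-- pv_equiv track=rewrite | github.com/luiscopa3000/ProgramacionCompetitiva2 | OoopsUnaMatriz.py | NaNum
-- ===== SOURCE A (Python) =====
-- def fibonacci(n):
-- 	if n == 0:
-- 		return (0, 1)
-- 	else:
-- 		a, b = fibonacci(n // 2)
-- 		c = a * (b * 2 - a)
-- 		d = a * a + b * b
-- 		if n % 2 == 0:
-- 			return (c, d)
-- 		else:
-- 			return (d, c + d)
--
-- def NaNum(a,b):
--     c = 0; m =[]
--     for i in range(a):
--         v = [];s=[]
--         for j in range(b):
--             s.append(str(fibonacci(c)[0]))
--             c += 1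
--             v.append(str(c))
--         if len(m) < a:
--             m.append(" ".join(v))
--         if len(m) < a:
--             m.append(" ".join(s[::-1]))
--         else:
--             break
--     return list(reversed(m))
-- ===== SOURCE B (Python) =====
-- def NaNum(a, b):
--     # Build rows bottom-up with a running Fibonacci pair (one addition per cell)
--     # then reverse once at the end.
--     m = []
--     f0, f1 = 0, 1
--     k = 1  # next index value for an index row
--     while len(m) < a:
--         m.append(" ".join(str(k + j) for j in range(b)))
--         if len(m) < a:
--             row = []
--             for _ in range(b):
--                 row.append(str(f0))
--                 f0, f1 = f1, f0 + f1
--             m.append(" ".join(reversed(row)))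
--         k += b
--     m.reverse()
--     return m
-- ===== Notes on version B (the rewrite author's own statement) =====
-- stated objective: alternative
-- what changed: B replaces the per-cell recursive fast-doubling fibonacci(c) call and A's append-then-break bookkeeping with one running Fibonacci pair advanced by a single addition per cell, a plain while loop that builds exactly the rows needed, and one final reverse.
import Mathlib
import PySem

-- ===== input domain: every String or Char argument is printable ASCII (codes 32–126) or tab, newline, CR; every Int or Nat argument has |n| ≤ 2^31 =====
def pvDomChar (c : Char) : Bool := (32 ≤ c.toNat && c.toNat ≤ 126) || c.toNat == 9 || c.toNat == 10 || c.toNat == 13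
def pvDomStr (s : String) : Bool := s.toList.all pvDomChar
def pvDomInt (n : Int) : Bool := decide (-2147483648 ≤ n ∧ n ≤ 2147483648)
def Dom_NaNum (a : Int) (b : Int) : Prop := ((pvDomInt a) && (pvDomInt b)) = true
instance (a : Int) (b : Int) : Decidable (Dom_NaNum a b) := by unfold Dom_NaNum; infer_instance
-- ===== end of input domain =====

-- B builds the rows with one running Fibonacci pair (one addition per cell) instead of
-- calling the recursive fast-doubling fibonacci(c) from scratch for every cell (alternative
-- algorithm; return values identical).

-- ===== PORT A =====

-- A's fast-doubling fibonacci; the `n ≤ 0` guard only makes it total (A's test is `n == 0`;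
-- negative n never occurs: it is only called on the counter c, which starts at 0 and grows).
def fibonacciA (n : Int) : Int × Int :=
  if n ≤ 0 then (0, 1)
  else
    let p := fibonacciA (PySem.Int.floordiv n 2)
    let c := p.1 * (p.2 * 2 - p.1)
    let d := p.1 * p.1 + p.2 * p.2
    if PySem.Int.mod n 2 = 0 then (c, d) else (d, c + d)
termination_by n.toNat
decreasing_by
  rw [PySem.Int.floordiv_eq_ediv_of_pos (by omega : (0:Int) < 2)]
  omega

-- the inner `for j in range(b)` loop: state (s, c, v)
def innerA (l : List Int) (st : List String × Int × List String) :
    List String × Int × List String :=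
  l.foldl (fun st _ =>
    (st.1 ++ [PySem.Int.toStr (fibonacciA st.2.1).1], st.2.1 + 1,
     st.2.2 ++ [PySem.Int.toStr (st.2.1 + 1)])) st

-- the outer `for i in range(a)` loop with its two `if len(m) < a` checks and break
def goA (a b : Int) : Nat → Int → List String → List String
  | 0, _, m => m
  | fuel + 1, c, m =>
    let st := innerA (PySem.List.pyRange 0 b 1) ([], c, [])
    let m1 := if (m.length : Int) < a then m ++ [PySem.Str.join " " st.2.2] else m
    if (m1.length : Int) < a then
      goA a b fuel st.2.1 (m1 ++ [PySem.Str.join " " st.1.reverse])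
    else m1

def NaNum (a : Int) (b : Int) : List String :=
  (goA a b a.toNat 0 []).reverse

-- ===== PORT B =====

-- one fib row: state (row, f0, f1), one addition per cell
def fibRowB (l : List Int) (st : List String × Int × Int) : List String × Int × Int :=
  l.foldl (fun st _ => (st.1 ++ [PySem.Int.toStr st.2.1], st.2.2, st.2.1 + st.2.2)) st

-- the `while len(m) < a` loop of B
def goB (a b : Int) (f0 f1 k : Int) (m : List String) : List String :=
  if _h : (m.length : Int) < a then
    let m1 := m ++ [PySem.Str.join " "
      ((PySem.List.pyRange 0 b 1).map (fun j => PySem.Int.toStr (k + j)))]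
    if _h2 : (m1.length : Int) < a then
      let st := fibRowB (PySem.List.pyRange 0 b 1) ([], f0, f1)
      goB a b st.2.1 st.2.2 (k + b) (m1 ++ [PySem.Str.join " " st.1.reverse])
    else
      goB a b f0 f1 (k + b) m1
  else m
termination_by (a - m.length).toNat
decreasing_by
  · simp; omega
  · simp; omega

def NaNum_alt (a : Int) (b : Int) : List String :=
  (goB a b 0 1 1 []).reverse

-- ===== PRECONDITION & SPEC =====
def Spec_NaNum (a : Int) (b : Int) (out : List String) : Prop := out = NaNum_alt a b
instance (a : Int) (b : Int) (out : List String) : Decidable (Spec_NaNum a b out) := by unfold Spec_NaNum; infer_instance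

-- ===== CLAIM (what is proved, stated in full; the proofs are below) =====
def Claim_equal_NaNum : Prop := ∀ (a : Int) (b : Int), Dom_NaNum a b → Spec_NaNum a b (NaNum a b)

-- ===== LEMMAS AND PROOFS =====

def F (n : Nat) : Int := (Nat.fib n : Int)

theorem fib_step (n : Nat) : F n + F (n + 1) = F (n + 2) := by
  simp only [F, Nat.fib_add_two]; push_cast; ring

theorem fibA_eq : ∀ n : Nat, fibonacciA (n : Int) = (F n, F (n + 1)) := by
  intro n
  induction n using Nat.strong_induction_on with
  | _ n ih =>
    rw [fibonacciA]
    by_cases h0 : n = 0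
    · subst h0; simp [F]
    · rw [if_neg (by omega)]
      obtain ⟨m, hm⟩ : ∃ m, n / 2 = m := ⟨n / 2, rfl⟩
      have hdiv : PySem.Int.floordiv (n:Int) 2 = ((m : Nat) : Int) := by
        rw [← hm]; exact_mod_cast PySem.Int.floordiv_natCast n 2
      have hmod : PySem.Int.mod (n:Int) 2 = ((n % 2 : Nat) : Int) := by
        exact_mod_cast PySem.Int.mod_natCast n 2
      rw [hdiv, ih m (by omega), hmod]
      dsimp only
      have hle : Nat.fib m ≤ 2 * Nat.fib (m + 1) :=
        le_trans Nat.fib_le_fib_succ (by omega)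
      have h2m : F (2 * m) = F m * (F (m + 1) * 2 - F m) := by
        simp only [F, Nat.fib_two_mul]
        push_cast [hle]
        ring
      have h2m1 : F (2 * m + 1) = F m * F m + F (m + 1) * F (m + 1) := by
        simp only [F, Nat.fib_two_mul_add_one]
        push_cast
        ring
      rcases Nat.even_or_odd n with he | ho
      · have h2 : n % 2 = 0 := Nat.even_iff.mp he
        have hn : n = 2 * m := by omega
        rw [h2, Nat.cast_zero, if_pos rfl, hn, Prod.mk.injEq]
        exact ⟨h2m.symm, h2m1.symm⟩
      · have h2 : n % 2 = 1 := Nat.odd_iff.mp ho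
        have hn : n = 2 * m + 1 := by omega
        rw [h2, Nat.cast_one, if_neg (by norm_num), hn, Prod.mk.injEq]
        refine ⟨h2m1.symm, ?_⟩
        have hstep : F (2 * m + 1 + 1) = F (2 * m) + F (2 * m + 1) := by
          show ((Nat.fib (2 * m + 2) : Int)) = _
          rw [Nat.fib_add_two]
          push_cast [F]
          ring
        rw [hstep, h2m, h2m1]

theorem innerA_eq (l : List Int) : ∀ (s : List String) (c : Int) (v : List String),
    innerA l (s, c, v) =
      (s ++ (List.range l.length).map (fun (t : Nat) => PySem.Int.toStr (fibonacciA (c + (t : Int))).1),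
       c + l.length,
       v ++ (List.range l.length).map (fun (t : Nat) => PySem.Int.toStr (c + (t : Int) + 1))) := by
  induction l with
  | nil => intro s c v; simp [innerA]
  | cons x xs ih =>
    intro s c v
    simp only [innerA, List.foldl_cons] at *
    rw [ih]
    simp only [List.length_cons, List.range_succ_eq_map, List.map_cons, List.map_map,
      Nat.cast_zero, add_zero, List.append_assoc, List.singleton_append, Prod.mk.injEq]
    refine ⟨?_, by push_cast; ring, ?_⟩ <;>
    · refine congrArg₂ _ rfl (congrArg₂ List.cons rfl ?_)
      apply List.map_congr_left
      intro t _
      simp only [Function.comp_apply, Nat.succ_eq_add_one]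
      push_cast
      ring_nf

theorem fibRowB_eq (l : List Int) : ∀ (row : List String) (n : Nat),
    fibRowB l (row, F n, F (n + 1)) =
      (row ++ (List.range l.length).map (fun (t : Nat) => PySem.Int.toStr (F (n + t))),
       F (n + l.length), F (n + l.length + 1)) := by
  induction l with
  | nil => intro row n; simp [fibRowB]
  | cons x xs ih =>
    intro row n
    simp only [fibRowB, List.foldl_cons] at *
    rw [show F n + F (n + 1) = F (n + 1 + 1) from fib_step n, ih]
    simp only [List.length_cons, List.range_succ_eq_map, List.map_cons, List.map_map,
      Nat.add_zero, List.append_assoc, List.singleton_append, Prod.mk.injEq]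
    refine ⟨?_, by ring_nf, by ring_nf⟩
    refine congrArg₂ _ rfl (congrArg₂ List.cons rfl ?_)
    apply List.map_congr_left
    intro t _
    simp only [Function.comp_apply, Nat.succ_eq_add_one]
    ring_nf

theorem go_eq (a b : Int) : ∀ (fuel i : Nat) (m : List String),
    m.length = 2 * i → fuel + i = a.toNat →
    goA a b fuel ((i * b.toNat : Nat) : Int) m
      = goB a b (F (i * b.toNat)) (F (i * b.toNat + 1)) (1 + i * b) m := by
  intro fuel
  induction fuel with
  | zero =>
    intro i m hm hf
    rw [goA, goB, dif_neg (by omega)]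
  | succ fuel ih =>
    intro i m hm hf
    have hlen : (PySem.List.pyRange 0 b 1).length = b.toNat := by
      rw [PySem.List.length_pyRange_one]; omega
    by_cases h1 : ((m.length : Int) < a)
    · -- index row gets appended on both sides
      have hv : (PySem.List.pyRange 0 b 1).map (fun j => PySem.Int.toStr (1 + (i : Int) * b + j))
          = (List.range b.toNat).map
              (fun (t : Nat) => PySem.Int.toStr (((i * b.toNat : Nat) : Int) + (t : Int) + 1)) := by
        rw [PySem.List.pyRange_one, List.map_map]
        by_cases hb : b ≤ 0
        · have hz : (b - 0).toNat = 0 := by omega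
          have hw : b.toNat = 0 := by omega
          simp [hw]
        · have hbw : ((b.toNat : Int)) = b := by omega
          have hz : (b - 0).toNat = b.toNat := by omega
          rw [hz]
          apply List.map_congr_left
          intro t _
          simp only [Function.comp_apply]
          congr 1
          push_cast [hbw]
          ring
      rw [goA, goB, dif_pos h1, if_pos h1]
      rw [innerA_eq, hlen]
      rw [fibRowB_eq, hlen]
      simp only [List.nil_append]
      rw [hv]
      by_cases h2 : (((m ++ [PySem.Str.join " " ((List.range b.toNat).map
            (fun (t : Nat) => PySem.Int.toStr (((i * b.toNat : Nat) : Int) + (t : Int) + 1)))]).length : Int) < a)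
      · rw [if_pos h2, dif_pos h2]
        have hs : (List.range b.toNat).map
              (fun (t : Nat) => PySem.Int.toStr (fibonacciA (((i * b.toNat : Nat) : Int) + (t : Int))).1)
            = (List.range b.toNat).map
              (fun (t : Nat) => PySem.Int.toStr (F (i * b.toNat + t))) := by
          apply List.map_congr_left
          intro t _
          have hc : (((i * b.toNat : Nat) : Int) + (t : Int)) = ((i * b.toNat + t : Nat) : Int) := by
            push_cast; ring
          rw [hc, fibA_eq (i * b.toNat + t)]
        rw [hs]
        have hc1 : (((i * b.toNat : Nat) : Int) + ((b.toNat : Nat) : Int)) = (((i + 1) * b.toNat : Nat) : Int) := by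
          push_cast; ring
        have hn1 : i * b.toNat + b.toNat = (i + 1) * b.toNat := by ring
        have hk1 : 1 + (i : Int) * b + b = 1 + ((i : Nat) + 1 : Nat) * b := by push_cast; ring
        rw [hc1, hn1, hk1]
        exact ih (i + 1) _ (by simp [hm]; omega) (by omega)
      · rw [if_neg h2, dif_neg h2]
        rw [goB, dif_neg h2]
    · -- m is already full: A runs one more inner loop and breaks, B exits at once
      rw [goA, goB, dif_neg h1, if_neg h1, if_neg h1]

-- ===== VERDICT (by name: the statement is the Claim_ definition above) =====
theorem NaNum_spec : Claim_equal_NaNum := by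
  intro a b _
  unfold Spec_NaNum NaNum NaNum_alt
  have h := go_eq a b a.toNat 0 [] (by simp) (by simp)
  simpa using congrArg List.reverse h
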